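-- pv_equiv track=rewrite | github.com/LadyM2019/SoftUni | Python/Python-Basics/5.Simple_Loops/7.Vowels Sum.py | count_vowel_values3
-- ===== SOURCE A (Python) =====
-- def count_vowel_values3(word):
--     vowels = {"a": 1,
--               "e": 2,
--               "i": 3,
--               "o": 4,
--               "u": 5
--               }
--
--     total_sum = 0
--     for letter_index in range(0, len(word)):
--         current_letter = word[letter_index]
--
--         if current_letter in vowels:
--             total_sum += vowels[current_letter]
--
--     return total_sum
-- ===== SOURCE B (Python) =====
-- def count_vowel_values3(word):
--     total = 0
--     for letter, value in [("a", 1), ("e", 2), ("i", 3), ("o", 4), ("u", 5)]: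
--         total += value * word.count(letter)
--     return total
-- ===== Notes on version B (the rewrite author's own statement) =====
-- stated objective: faster
-- what changed: B loops over the five vowels and multiplies each weight by word.count(letter), replacing A's single index-driven Python-level classifying pass with five C-level occurrence-count scans.
import Mathlib
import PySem

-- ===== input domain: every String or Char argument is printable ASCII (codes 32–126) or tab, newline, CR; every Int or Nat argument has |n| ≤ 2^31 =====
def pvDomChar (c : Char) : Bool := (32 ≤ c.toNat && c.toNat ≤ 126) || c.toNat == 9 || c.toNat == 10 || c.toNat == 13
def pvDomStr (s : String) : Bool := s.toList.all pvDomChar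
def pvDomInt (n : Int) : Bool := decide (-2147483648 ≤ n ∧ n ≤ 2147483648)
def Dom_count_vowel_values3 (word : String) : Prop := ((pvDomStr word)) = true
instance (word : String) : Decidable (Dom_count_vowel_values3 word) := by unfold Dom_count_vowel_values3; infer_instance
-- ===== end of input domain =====

-- B changes the traversal: instead of one classifying pass over the word's characters
-- it scans the word once per vowel via str.count and sums weight * count (objective: faster, constant-factor: C-level str.count scans).

-- ===== PORT A =====
def count_vowel_values3 (word : String) : Int :=
  let vowels : PySem.Dict Char Int :=
    PySem.Dict.ofList [('a', 1), ('e', 2), ('i', 3), ('o', 4), ('u', 5)]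
  (PySem.List.pyRange 0 (PySem.List.len word.toList)).foldl
    (fun total_sum letter_index =>
      let current_letter := PySem.List.pyGetD word.toList letter_index ' '  -- index always in range
      if vowels.contains current_letter then total_sum + vowels.getD current_letter 0
      else total_sum) 0

-- ===== PORT B =====
def count_vowel_values3_alt (word : String) : Int :=
  [("a", (1 : Int)), ("e", 2), ("i", 3), ("o", 4), ("u", 5)].foldl
    (fun total p => total + p.2 * (PySem.Str.count word p.1 : Int)) 0

-- ===== PRECONDITION & SPEC =====
def Spec_count_vowel_values3 (word : String) (out : Int) : Prop := out = count_vowel_values3_alt word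
instance (word : String) (out : Int) : Decidable (Spec_count_vowel_values3 word out) := by unfold Spec_count_vowel_values3; infer_instance

-- ===== CLAIM (what is proved, stated in full; the proofs are below) =====
def Claim_equal_count_vowel_values3 : Prop := ∀ (word : String), Dom_count_vowel_values3 word → Spec_count_vowel_values3 word (count_vowel_values3 word)

-- ===== LEMMAS AND PROOFS =====

-- single-character substring count = character count
theorem chars_count_go_singleton (v : Char) (l : List Char) (fuel acc : Nat)
    (h : l.length ≤ fuel) :
    PySem.Chars.count.go [v] fuel l acc = acc + l.count v := by
  induction l generalizing fuel acc with
  | nil => cases fuel <;> simp [PySem.Chars.count.go]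
  | cons c t ih =>
    cases fuel with
    | zero => simp at h
    | succ n =>
      simp only [List.length_cons, Nat.succ_le_succ_iff] at h
      by_cases hv : c = v
      · subst hv
        simp [PySem.Chars.count.go, List.isPrefixOf, ih _ _ h]
        omega
      · have : List.isPrefixOf [v] (c :: t) = false := by
          simp [List.isPrefixOf]; exact fun hvc => (hv hvc.symm).elim
        simp [PySem.Chars.count.go, this, ih _ _ h, hv]

theorem chars_count_singleton (v : Char) (l : List Char) :
    PySem.Chars.count l [v] = l.count v := by
  simp [PySem.Chars.count, chars_count_go_singleton v l l.length 0 le_rfl]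

-- A's per-character fold equals the weighted sum of the five vowel counts
theorem vowel_fold_eq (l : List Char) (a : Int) :
    l.foldl
      (fun total_sum c =>
        if (PySem.Dict.ofList [('a', (1:Int)), ('e', 2), ('i', 3), ('o', 4), ('u', 5)]).contains c
        then total_sum + (PySem.Dict.ofList [('a', (1:Int)), ('e', 2), ('i', 3), ('o', 4), ('u', 5)]).getD c 0
        else total_sum) a
    = a + 1 * (l.count 'a' : Int) + 2 * (l.count 'e' : Int) + 3 * (l.count 'i' : Int)
        + 4 * (l.count 'o' : Int) + 5 * (l.count 'u' : Int) := by
  induction l generalizing a with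
  | nil => simp
  | cons c t ih =>
    simp only [List.foldl_cons, List.count_cons, ih]
    by_cases ha : c = 'a'
    · subst ha
      simp only [show (PySem.Dict.ofList [('a', (1:Int)), ('e', 2), ('i', 3), ('o', 4), ('u', 5)]).contains 'a' = true from by decide,
                 show (PySem.Dict.ofList [('a', (1:Int)), ('e', 2), ('i', 3), ('o', 4), ('u', 5)]).getD 'a' 0 = (1:Int) from by decide, if_true]
      simp; ring
    · by_cases he : c = 'e'
      · subst he
        simp only [show (PySem.Dict.ofList [('a', (1:Int)), ('e', 2), ('i', 3), ('o', 4), ('u', 5)]).contains 'e' = true from by decide,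
                   show (PySem.Dict.ofList [('a', (1:Int)), ('e', 2), ('i', 3), ('o', 4), ('u', 5)]).getD 'e' 0 = (2:Int) from by decide, if_true]
        simp; ring
      · by_cases hi : c = 'i'
        · subst hi
          simp only [show (PySem.Dict.ofList [('a', (1:Int)), ('e', 2), ('i', 3), ('o', 4), ('u', 5)]).contains 'i' = true from by decide,
                     show (PySem.Dict.ofList [('a', (1:Int)), ('e', 2), ('i', 3), ('o', 4), ('u', 5)]).getD 'i' 0 = (3:Int) from by decide, if_true]
          simp; ring
        · by_cases ho : c = 'o'
          · subst ho
            simp only [show (PySem.Dict.ofList [('a', (1:Int)), ('e', 2), ('i', 3), ('o', 4), ('u', 5)]).contains 'o' = true from by decide,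
                       show (PySem.Dict.ofList [('a', (1:Int)), ('e', 2), ('i', 3), ('o', 4), ('u', 5)]).getD 'o' 0 = (4:Int) from by decide, if_true]
            simp; ring
          · by_cases hu : c = 'u'
            · subst hu
              simp only [show (PySem.Dict.ofList [('a', (1:Int)), ('e', 2), ('i', 3), ('o', 4), ('u', 5)]).contains 'u' = true from by decide,
                         show (PySem.Dict.ofList [('a', (1:Int)), ('e', 2), ('i', 3), ('o', 4), ('u', 5)]).getD 'u' 0 = (5:Int) from by decide, if_true]
              simp; ring
            · have hc : (PySem.Dict.ofList [('a', (1:Int)), ('e', 2), ('i', 3), ('o', 4), ('u', 5)]).contains c = false := by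
                simp [PySem.Dict.contains, PySem.Dict.ofList, PySem.Dict.update, PySem.Dict.insert,
                      PySem.Dict.empty, List.foldl]
                exact ⟨fun h => ha h.symm, fun h => he h.symm, fun h => hi h.symm,
                       fun h => ho h.symm, fun h => hu h.symm⟩
              simp [hc, ha, he, hi, ho, hu]

-- ===== VERDICT (by name: the statement is the Claim_ definition above) =====
theorem count_vowel_values3_spec : Claim_equal_count_vowel_values3 := by
  intro word _
  unfold Spec_count_vowel_values3 count_vowel_values3 count_vowel_values3_alt
  rw [PySem.List.foldl_pyRange_pyGetD word.toList ' '
        (fun total_sum c =>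
          if (PySem.Dict.ofList [('a', (1:Int)), ('e', 2), ('i', 3), ('o', 4), ('u', 5)]).contains c
          then total_sum + (PySem.Dict.ofList [('a', (1:Int)), ('e', 2), ('i', 3), ('o', 4), ('u', 5)]).getD c 0
          else total_sum) 0 le_rfl]
  simp only [Int.toNat_zero, List.drop_zero, vowel_fold_eq]
  simp [List.foldl, PySem.Str.count_eq, chars_count_singleton]
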